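-- pv_equiv track=rewrite | github.com/TarniceriuLuca/AlgoritmiDeSortare | radixSorts.py | pseudoBucketSort
-- ===== SOURCE A (Python) =====
-- def pseudoBucketSort(list, digit):
--     resList = []
--     for i in range(10):
--         resList.append([])
--
--     for elements in list:
--         resList[elements//digit%10].append(elements)
--
--     list.clear()
--     for i in range(10):
--         list.extend(resList[i])
--
--     return list
-- ===== SOURCE B (Python) =====
-- def pseudoBucketSort(list, digit):
--     out = []
--     for d in range(10):
--         out.extend(x for x in list if x // digit % 10 == d)
--     list[:] = out
--     return list
-- ===== Notes on version B (the rewrite author's own statement) =====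
-- stated objective: simpler
-- what changed: Replaces the single distribution pass into 10 bucket lists (plus a concatenation pass) with ten filter passes over the input, one per digit class, concatenated in order; no bucket structure is maintained.
import Mathlib
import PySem

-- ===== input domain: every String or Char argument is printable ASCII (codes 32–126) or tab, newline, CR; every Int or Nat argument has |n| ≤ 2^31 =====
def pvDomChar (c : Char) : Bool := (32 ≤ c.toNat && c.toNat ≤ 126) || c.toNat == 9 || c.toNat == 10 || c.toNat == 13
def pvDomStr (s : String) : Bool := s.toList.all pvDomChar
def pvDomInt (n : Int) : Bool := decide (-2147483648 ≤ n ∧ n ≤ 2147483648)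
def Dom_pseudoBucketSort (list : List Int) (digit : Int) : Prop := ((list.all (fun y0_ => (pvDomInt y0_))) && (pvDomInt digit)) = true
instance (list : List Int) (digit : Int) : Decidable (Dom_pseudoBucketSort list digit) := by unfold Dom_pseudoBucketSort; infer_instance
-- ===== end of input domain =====

-- B replaces A's one-pass distribution into 10 bucket lists with ten ordered filter passes:
-- simpler, same return value. Both A and B mutate the argument list in place the same way
-- (A: clear+extend, B: slice assignment); the equivalence proved here is about the return value.

-- ===== PORT A =====
def pseudoBucketSort (list : List Int) (digit : Int) : List Int :=
  -- resList = [[] for _ in range(10)]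
  let resList : List (List Int) :=
    (PySem.List.pyRange 0 10 1).foldl (fun rl _ => rl ++ [([] : List Int)]) []
  -- for elements in list: resList[elements//digit%10].append(elements)
  -- under Pre_ the index elements//digit%10 is in 0..9 (Python mod by positive 10), so .toNat is exact
  let resList := list.foldl (fun rl e =>
      let idx := (PySem.Int.mod (PySem.Int.floordiv e digit) 10).toNat
      rl.set idx (rl.getD idx [] ++ [e])) resList
  -- list.clear(); for i in range(10): list.extend(resList[i])
  (PySem.List.pyRange 0 10 1).foldl (fun acc i => acc ++ resList.getD i.toNat []) []

-- ===== PORT B =====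
def pseudoBucketSort_alt (list : List Int) (digit : Int) : List Int :=
  (PySem.List.pyRange 0 10 1).foldl
    (fun out d => out ++ list.filter (fun x => PySem.Int.mod (PySem.Int.floordiv x digit) 10 == d)) []

-- ===== PRECONDITION & SPEC =====
-- Pre_ excludes exactly the inputs on which A raises ZeroDivisionError: a nonempty list with digit = 0.
def Pre_pseudoBucketSort (list : List Int) (digit : Int) : Prop := list = [] ∨ digit ≠ 0
instance (list : List Int) (digit : Int) : Decidable (Pre_pseudoBucketSort list digit) := by unfold Pre_pseudoBucketSort; infer_instance
def pvWitness_pseudoBucketSort : List Int × Int := ([170, 3, 45, 75, 90, 2, 802, 2, 66], 1)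

def Spec_pseudoBucketSort (list : List Int) (digit : Int) (out : List Int) : Prop := out = pseudoBucketSort_alt list digit
instance (list : List Int) (digit : Int) (out : List Int) : Decidable (Spec_pseudoBucketSort list digit out) := by unfold Spec_pseudoBucketSort; infer_instance

-- ===== CLAIM (what is proved, stated in full; the proofs are below) =====
def Claim_equal_pseudoBucketSort : Prop := ∀ (list : List Int) (digit : Int), Dom_pseudoBucketSort list digit → Pre_pseudoBucketSort list digit → Spec_pseudoBucketSort list digit (pseudoBucketSort list digit)

-- ===== LEMMAS AND PROOFS =====

theorem pv_getD_set (rl : List (List Int)) (n m : Nat) (v : List Int) (hn : n < rl.length) :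
    (rl.set n v).getD m [] = if n = m then v else rl.getD m [] := by
  rw [List.getD_eq_getElem?_getD, List.getElem?_set, List.getD_eq_getElem?_getD]
  split_ifs with h <;> simp

-- bucket invariant: after distributing l, bucket i holds its old contents followed by
-- the elements of l whose digit class is i, in order
theorem pv_bucket_inv (digit : Int) (l : List Int) :
    ∀ (rl : List (List Int)), rl.length = 10 → ∀ (i : Nat), i < 10 →
    (l.foldl (fun rl e =>
        rl.set (PySem.Int.mod (PySem.Int.floordiv e digit) 10).toNat
          (rl.getD (PySem.Int.mod (PySem.Int.floordiv e digit) 10).toNat [] ++ [e])) rl).getD i []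
      = rl.getD i [] ++ l.filter (fun x => PySem.Int.mod (PySem.Int.floordiv x digit) 10 == (i : Int)) := by
  induction l with
  | nil => intro rl _ i _; simp
  | cons e l ih =>
    intro rl hlen i hi
    have h0 : 0 ≤ PySem.Int.mod (PySem.Int.floordiv e digit) 10 :=
      PySem.Int.mod_nonneg _ (by norm_num)
    have h10 : PySem.Int.mod (PySem.Int.floordiv e digit) 10 < 10 :=
      PySem.Int.mod_lt _ (by norm_num)
    simp only [List.foldl_cons]
    rw [ih _ (by simp [hlen]) i hi,
        pv_getD_set rl _ i _ (by rw [hlen]; omega)]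
    split_ifs with hcase
    · have hkeq : PySem.Int.mod (PySem.Int.floordiv e digit) 10 = (i : Int) := by omega
      have hkeq' : (PySem.Int.mod (PySem.Int.floordiv e digit) 10 == (i : Int)) = true :=
        beq_iff_eq.mpr hkeq
      simp only [List.filter_cons, hkeq', if_true, hcase]
      simp
    · have hkne : PySem.Int.mod (PySem.Int.floordiv e digit) 10 ≠ (i : Int) := by omega
      have hkne' : (PySem.Int.mod (PySem.Int.floordiv e digit) 10 == (i : Int)) = false :=
        beq_eq_false_iff_ne.mpr hkne
      simp only [List.filter_cons, hkne', Bool.false_eq_true, if_false]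

theorem pv_range10 : PySem.List.pyRange 0 10 1 = [0,1,2,3,4,5,6,7,8,9] := by decide

theorem pv_init10 :
    ((PySem.List.pyRange 0 10 1).foldl (fun rl _ => rl ++ [([] : List Int)]) []) =
      [[],[],[],[],[],[],[],[],[],[]] := by decide

-- ===== VERDICT (by name: the statement is the Claim_ definition above) =====
theorem pseudoBucketSort_spec : Claim_equal_pseudoBucketSort := by
  intro list digit _ hpre
  unfold Spec_pseudoBucketSort pseudoBucketSort pseudoBucketSort_alt
  rcases hpre with h | _hd
  · subst h
    rw [pv_init10, pv_range10]
    simp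
  · rw [pv_init10, pv_range10]
    have inv := pv_bucket_inv digit list [[],[],[],[],[],[],[],[],[],[]] (by decide)
    simp only [List.foldl_cons, List.foldl_nil, Int.toNat_zero, Int.toNat_one,
      (show ((2:Int)).toNat = 2 from rfl), (show ((3:Int)).toNat = 3 from rfl),
      (show ((4:Int)).toNat = 4 from rfl), (show ((5:Int)).toNat = 5 from rfl),
      (show ((6:Int)).toNat = 6 from rfl), (show ((7:Int)).toNat = 7 from rfl),
      (show ((8:Int)).toNat = 8 from rfl), (show ((9:Int)).toNat = 9 from rfl)]
    rw [inv 0 (by norm_num), inv 1 (by norm_num), inv 2 (by norm_num), inv 3 (by norm_num),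
        inv 4 (by norm_num), inv 5 (by norm_num), inv 6 (by norm_num), inv 7 (by norm_num),
        inv 8 (by norm_num), inv 9 (by norm_num)]
    simp
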